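-- pv_equiv track=rewrite | github.com/0x-Professor/VeilArmor | src/classifiers/input/system_prompt_leak.py | _categorize_techniques
-- ===== SOURCE A (Python) =====
-- from typing import Any, Dict, List, Optional, Tuple
--
-- def _categorize_techniques(patterns: List[str]) -> Dict[str, int]:
--     """Categorize detected techniques."""
--     categories = {
--         "direct_extraction": 0,
--         "manipulation": 0,
--         "probing": 0,
--         "encoding": 0,
--         "structural": 0,
--     }
--
--     direct_keywords = ["direct", "repeat", "recall", "dump"]
--     manipulation_keywords = ["format", "completion", "trick", "fake"]
--     probing_keywords = ["inquiry", "probe", "boundary"]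
--     encoding_keywords = ["translate", "encode", "base64"]
--     structural_keywords = ["token", "xml", "bracket", "prefix"]
--
--     for pattern in patterns:
--         pattern_lower = pattern.lower()
--         if any(k in pattern_lower for k in direct_keywords):
--             categories["direct_extraction"] += 1
--         elif any(k in pattern_lower for k in manipulation_keywords):
--             categories["manipulation"] += 1
--         elif any(k in pattern_lower for k in probing_keywords):
--             categories["probing"] += 1
--         elif any(k in pattern_lower for k in encoding_keywords):
--             categories["encoding"] += 1
--         elif any(k in pattern_lower for k in structural_keywords):
--             categories["structural"] += 1
--
--     return {k: v for k, v in categories.items() if v > 0}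
-- ===== SOURCE B (Python) =====
-- _TABLE = [
--     ("direct_extraction", ["direct", "repeat", "recall", "dump"]),
--     ("manipulation", ["format", "completion", "trick", "fake"]),
--     ("probing", ["inquiry", "probe", "boundary"]),
--     ("encoding", ["translate", "encode", "base64"]),
--     ("structural", ["token", "xml", "bracket", "prefix"]),
-- ]
--
--
-- def _categorize_techniques(patterns):
--     """Categorize detected techniques (staged sieve: one pass per category over the
--     shrinking list of still-unclassified patterns; counts are lengths of the sieved-out
--     sublists, so no per-pattern branch chain and no counter dict are needed)."""
--     remaining = [p.lower() for p in patterns]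
--     result = {}
--     for name, keywords in _TABLE:
--         matched = [p for p in remaining if any(k in p for k in keywords)]
--         remaining = [p for p in remaining if not any(k in p for k in keywords)]
--         if matched:
--             result[name] = len(matched)
--     return result
-- ===== Notes on version B (the rewrite author's own statement) =====
-- stated objective: alternative
-- what changed: Replaces A's single pass with a per-pattern five-way elif chain and a counter dict by a category-major staged sieve: five passes, each splitting the shrinking list of still-unclassified lowercased patterns into matched/remaining, with counts taken as lengths of the sieved-out sublists.
import Mathlib
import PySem

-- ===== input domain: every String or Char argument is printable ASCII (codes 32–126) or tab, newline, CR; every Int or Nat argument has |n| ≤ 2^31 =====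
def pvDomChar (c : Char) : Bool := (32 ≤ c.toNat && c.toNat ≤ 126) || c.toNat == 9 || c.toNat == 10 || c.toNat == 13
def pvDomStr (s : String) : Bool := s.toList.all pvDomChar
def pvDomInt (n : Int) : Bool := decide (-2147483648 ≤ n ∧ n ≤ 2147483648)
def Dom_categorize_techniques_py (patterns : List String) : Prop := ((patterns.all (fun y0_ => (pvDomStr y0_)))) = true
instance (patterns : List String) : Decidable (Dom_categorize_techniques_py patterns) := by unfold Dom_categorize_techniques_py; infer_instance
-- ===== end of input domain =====

-- B replaces A's single pattern-major pass (per-pattern five-way elif chain + counter dict)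
-- by a category-major staged sieve: five passes, each splitting the shrinking list of
-- still-unclassified lowercased patterns into matched/remaining, counts = lengths (alternative).

-- the five keyword lists (module-level constants shared by both programs)
def pvKw0 : List String := ["direct", "repeat", "recall", "dump"]
def pvKw1 : List String := ["format", "completion", "trick", "fake"]
def pvKw2 : List String := ["inquiry", "probe", "boundary"]
def pvKw3 : List String := ["translate", "encode", "base64"]
def pvKw4 : List String := ["token", "xml", "bracket", "prefix"]

-- any(k in p for k in kws)
def pvHit (kws : List String) (p : String) : Bool := kws.any (fun k => PySem.Str.isIn k p)

-- ===== PORT A =====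
-- loop body of A's for-loop (the five-way elif chain over the categories dict)
def pvAStep (cats : PySem.Dict String Int) (pattern : String) : PySem.Dict String Int :=
  let pattern_lower := PySem.Str.lower pattern
  if pvHit pvKw0 pattern_lower then
    cats.insert "direct_extraction" (cats.getD "direct_extraction" 0 + 1)
  else if pvHit pvKw1 pattern_lower then
    cats.insert "manipulation" (cats.getD "manipulation" 0 + 1)
  else if pvHit pvKw2 pattern_lower then
    cats.insert "probing" (cats.getD "probing" 0 + 1)
  else if pvHit pvKw3 pattern_lower then
    cats.insert "encoding" (cats.getD "encoding" 0 + 1)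
  else if pvHit pvKw4 pattern_lower then
    cats.insert "structural" (cats.getD "structural" 0 + 1)
  else cats

def categorize_techniques_py (patterns : List String) : List (String × Int) :=
  -- categories = the initial dict, then the for-loop, then {k: v for k, v in categories.items() if v > 0}
  (((patterns.foldl pvAStep
        (PySem.Dict.ofList [("direct_extraction", 0), ("manipulation", 0), ("probing", 0),
                            ("encoding", 0), ("structural", 0)])).items.filter
      (fun kv => decide (0 < kv.2))).foldl
      (fun d kv => d.insert kv.1 kv.2) PySem.Dict.empty).items

-- ===== PORT B =====
def pvTable : List (String × List String) :=
  [("direct_extraction", pvKw0), ("manipulation", pvKw1), ("probing", pvKw2),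
   ("encoding", pvKw3), ("structural", pvKw4)]

-- one stage of B's sieve: split the remaining patterns on this category's keywords,
-- record len(matched) when nonempty
def pvBStage (st : List String × PySem.Dict String Int) (cat : String × List String) :
    List String × PySem.Dict String Int :=
  let matched := st.1.filter (fun p => pvHit cat.2 p)
  let remaining := st.1.filter (fun p => !pvHit cat.2 p)
  (remaining, if matched = [] then st.2 else st.2.insert cat.1 (matched.length : Int))

def categorize_techniques_py_alt (patterns : List String) : List (String × Int) :=
  -- remaining = [p.lower() for p in patterns]; result = {}; for name, keywords in _TABLE: … ; return result
  (pvTable.foldl pvBStage (patterns.map PySem.Str.lower, PySem.Dict.empty)).2.items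

-- ===== PRECONDITION & SPEC =====
def Spec_categorize_techniques_py (patterns : List String) (out : List (String × Int)) : Prop := out = categorize_techniques_py_alt patterns
instance (patterns : List String) (out : List (String × Int)) : Decidable (Spec_categorize_techniques_py patterns out) := by unfold Spec_categorize_techniques_py; infer_instance

-- ===== CLAIM (what is proved, stated in full; the proofs are below) =====
def Claim_equal_categorize_techniques_py : Prop := ∀ (patterns : List String), Dom_categorize_techniques_py patterns → Spec_categorize_techniques_py patterns (categorize_techniques_py patterns)

-- ===== LEMMAS AND PROOFS =====

-- the lowered input and B's intermediate matched/remaining lists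
def pvL (ps : List String) : List String := ps.map PySem.Str.lower
def pvM0 (ps : List String) : List String := (pvL ps).filter (fun p => pvHit pvKw0 p)
def pvR0 (ps : List String) : List String := (pvL ps).filter (fun p => !pvHit pvKw0 p)
def pvM1 (ps : List String) : List String := (pvR0 ps).filter (fun p => pvHit pvKw1 p)
def pvR1 (ps : List String) : List String := (pvR0 ps).filter (fun p => !pvHit pvKw1 p)
def pvM2 (ps : List String) : List String := (pvR1 ps).filter (fun p => pvHit pvKw2 p)
def pvR2 (ps : List String) : List String := (pvR1 ps).filter (fun p => !pvHit pvKw2 p)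
def pvM3 (ps : List String) : List String := (pvR2 ps).filter (fun p => pvHit pvKw3 p)
def pvR3 (ps : List String) : List String := (pvR2 ps).filter (fun p => !pvHit pvKw3 p)
def pvM4 (ps : List String) : List String := (pvR3 ps).filter (fun p => pvHit pvKw4 p)

-- B's value, written with the named intermediate lists (definitional)
theorem pvB_eq (ps : List String) :
    categorize_techniques_py_alt ps =
    ((if pvM4 ps = [] then
        (if pvM3 ps = [] then
          (if pvM2 ps = [] then
            (if pvM1 ps = [] then
              (if pvM0 ps = [] then PySem.Dict.empty
               else PySem.Dict.empty.insert "direct_extraction" ((pvM0 ps).length : Int))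
             else (if pvM0 ps = [] then PySem.Dict.empty
               else PySem.Dict.empty.insert "direct_extraction" ((pvM0 ps).length : Int)).insert "manipulation" ((pvM1 ps).length : Int))
           else (if pvM1 ps = [] then
              (if pvM0 ps = [] then PySem.Dict.empty
               else PySem.Dict.empty.insert "direct_extraction" ((pvM0 ps).length : Int))
             else (if pvM0 ps = [] then PySem.Dict.empty
               else PySem.Dict.empty.insert "direct_extraction" ((pvM0 ps).length : Int)).insert "manipulation" ((pvM1 ps).length : Int)).insert "probing" ((pvM2 ps).length : Int))
         else ((if pvM2 ps = [] then
            (if pvM1 ps = [] then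
              (if pvM0 ps = [] then PySem.Dict.empty
               else PySem.Dict.empty.insert "direct_extraction" ((pvM0 ps).length : Int))
             else (if pvM0 ps = [] then PySem.Dict.empty
               else PySem.Dict.empty.insert "direct_extraction" ((pvM0 ps).length : Int)).insert "manipulation" ((pvM1 ps).length : Int))
           else (if pvM1 ps = [] then
              (if pvM0 ps = [] then PySem.Dict.empty
               else PySem.Dict.empty.insert "direct_extraction" ((pvM0 ps).length : Int))
             else (if pvM0 ps = [] then PySem.Dict.empty
               else PySem.Dict.empty.insert "direct_extraction" ((pvM0 ps).length : Int)).insert "manipulation" ((pvM1 ps).length : Int)).insert "probing" ((pvM2 ps).length : Int))).insert "encoding" ((pvM3 ps).length : Int))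
      else
        (if pvM3 ps = [] then
          (if pvM2 ps = [] then
            (if pvM1 ps = [] then
              (if pvM0 ps = [] then PySem.Dict.empty
               else PySem.Dict.empty.insert "direct_extraction" ((pvM0 ps).length : Int))
             else (if pvM0 ps = [] then PySem.Dict.empty
               else PySem.Dict.empty.insert "direct_extraction" ((pvM0 ps).length : Int)).insert "manipulation" ((pvM1 ps).length : Int))
           else (if pvM1 ps = [] then
              (if pvM0 ps = [] then PySem.Dict.empty
               else PySem.Dict.empty.insert "direct_extraction" ((pvM0 ps).length : Int))
             else (if pvM0 ps = [] then PySem.Dict.empty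
               else PySem.Dict.empty.insert "direct_extraction" ((pvM0 ps).length : Int)).insert "manipulation" ((pvM1 ps).length : Int)).insert "probing" ((pvM2 ps).length : Int))
         else ((if pvM2 ps = [] then
            (if pvM1 ps = [] then
              (if pvM0 ps = [] then PySem.Dict.empty
               else PySem.Dict.empty.insert "direct_extraction" ((pvM0 ps).length : Int))
             else (if pvM0 ps = [] then PySem.Dict.empty
               else PySem.Dict.empty.insert "direct_extraction" ((pvM0 ps).length : Int)).insert "manipulation" ((pvM1 ps).length : Int))
           else (if pvM1 ps = [] then
              (if pvM0 ps = [] then PySem.Dict.empty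
               else PySem.Dict.empty.insert "direct_extraction" ((pvM0 ps).length : Int))
             else (if pvM0 ps = [] then PySem.Dict.empty
               else PySem.Dict.empty.insert "direct_extraction" ((pvM0 ps).length : Int)).insert "manipulation" ((pvM1 ps).length : Int)).insert "probing" ((pvM2 ps).length : Int))).insert "encoding" ((pvM3 ps).length : Int)).insert "structural" ((pvM4 ps).length : Int)).items : List (String × Int)) := by
  rfl

theorem pvA_fold (ps : List String) : ∀ (c0 c1 c2 c3 c4 : Int),
    (ps.foldl pvAStep (PySem.Dict.mk [("direct_extraction", c0), ("manipulation", c1), ("probing", c2), ("encoding", c3), ("structural", c4)]))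
    = PySem.Dict.mk
        [("direct_extraction", c0 + ((pvL ps).countP (fun p => pvHit pvKw0 p) : Int)),
         ("manipulation", c1 + ((pvL ps).countP (fun p => pvHit pvKw1 p && !pvHit pvKw0 p) : Int)),
         ("probing", c2 + ((pvL ps).countP (fun p => pvHit pvKw2 p && (!pvHit pvKw1 p && !pvHit pvKw0 p)) : Int)),
         ("encoding", c3 + ((pvL ps).countP (fun p => pvHit pvKw3 p && (!pvHit pvKw2 p && (!pvHit pvKw1 p && !pvHit pvKw0 p))) : Int)),
         ("structural", c4 + ((pvL ps).countP (fun p => pvHit pvKw4 p && (!pvHit pvKw3 p && (!pvHit pvKw2 p && (!pvHit pvKw1 p && !pvHit pvKw0 p)))) : Int))] := by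
  induction ps with
  | nil => intro c0 c1 c2 c3 c4; simp [pvL]
  | cons p ps ih =>
    intro c0 c1 c2 c3 c4
    rw [List.foldl_cons]
    have hL : pvL (p :: ps) = PySem.Str.lower p :: pvL ps := rfl
    by_cases h0 : pvHit pvKw0 (PySem.Str.lower p) = true
    · rw [show pvAStep (PySem.Dict.mk [("direct_extraction", c0), ("manipulation", c1), ("probing", c2), ("encoding", c3), ("structural", c4)]) p
          = PySem.Dict.mk [("direct_extraction", c0 + 1), ("manipulation", c1), ("probing", c2), ("encoding", c3), ("structural", c4)] from by
        simp only [pvAStep]; rw [if_pos h0]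
        simp [PySem.Dict.insert, PySem.Dict.getD, PySem.Dict.get?], ih]
      apply PySem.Dict.ext
      simp [hL, h0]
      omega
    by_cases h1 : pvHit pvKw1 (PySem.Str.lower p) = true
    · rw [show pvAStep (PySem.Dict.mk [("direct_extraction", c0), ("manipulation", c1), ("probing", c2), ("encoding", c3), ("structural", c4)]) p
          = PySem.Dict.mk [("direct_extraction", c0), ("manipulation", c1 + 1), ("probing", c2), ("encoding", c3), ("structural", c4)] from by
        simp only [pvAStep]; rw [if_neg h0, if_pos h1]
        simp [PySem.Dict.insert, PySem.Dict.getD, PySem.Dict.get?], ih]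
      apply PySem.Dict.ext
      simp [hL, h0, h1]
      omega
    by_cases h2 : pvHit pvKw2 (PySem.Str.lower p) = true
    · rw [show pvAStep (PySem.Dict.mk [("direct_extraction", c0), ("manipulation", c1), ("probing", c2), ("encoding", c3), ("structural", c4)]) p
          = PySem.Dict.mk [("direct_extraction", c0), ("manipulation", c1), ("probing", c2 + 1), ("encoding", c3), ("structural", c4)] from by
        simp only [pvAStep]; rw [if_neg h0, if_neg h1, if_pos h2]
        simp [PySem.Dict.insert, PySem.Dict.getD, PySem.Dict.get?], ih]
      apply PySem.Dict.ext
      simp [hL, h0, h1, h2]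
      omega
    by_cases h3 : pvHit pvKw3 (PySem.Str.lower p) = true
    · rw [show pvAStep (PySem.Dict.mk [("direct_extraction", c0), ("manipulation", c1), ("probing", c2), ("encoding", c3), ("structural", c4)]) p
          = PySem.Dict.mk [("direct_extraction", c0), ("manipulation", c1), ("probing", c2), ("encoding", c3 + 1), ("structural", c4)] from by
        simp only [pvAStep]; rw [if_neg h0, if_neg h1, if_neg h2, if_pos h3]
        simp [PySem.Dict.insert, PySem.Dict.getD, PySem.Dict.get?], ih]
      apply PySem.Dict.ext
      simp [hL, h0, h1, h2, h3]
      omega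
    by_cases h4 : pvHit pvKw4 (PySem.Str.lower p) = true
    · rw [show pvAStep (PySem.Dict.mk [("direct_extraction", c0), ("manipulation", c1), ("probing", c2), ("encoding", c3), ("structural", c4)]) p
          = PySem.Dict.mk [("direct_extraction", c0), ("manipulation", c1), ("probing", c2), ("encoding", c3), ("structural", c4 + 1)] from by
        simp only [pvAStep]; rw [if_neg h0, if_neg h1, if_neg h2, if_neg h3, if_pos h4]
        simp [PySem.Dict.insert, PySem.Dict.getD, PySem.Dict.get?], ih]
      apply PySem.Dict.ext
      simp [hL, h0, h1, h2, h3, h4]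
      omega
    rw [show pvAStep (PySem.Dict.mk [("direct_extraction", c0), ("manipulation", c1), ("probing", c2), ("encoding", c3), ("structural", c4)]) p
        = PySem.Dict.mk [("direct_extraction", c0), ("manipulation", c1), ("probing", c2), ("encoding", c3), ("structural", c4)] from by
      simp only [pvAStep]; rw [if_neg h0, if_neg h1, if_neg h2, if_neg h3, if_neg h4], ih]
    apply PySem.Dict.ext
    simp [hL, h0, h1, h2, h3, h4]

-- the lengths of B's sieved-out sublists are exactly the first-match counts A accumulates
theorem pvLen0 (ps : List String) : (pvM0 ps).length = (pvL ps).countP (fun p => pvHit pvKw0 p) := by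
  simp [pvM0, ← List.countP_eq_length_filter]
theorem pvLen1 (ps : List String) : (pvM1 ps).length = (pvL ps).countP (fun p => pvHit pvKw1 p && !pvHit pvKw0 p) := by
  simp [pvM1, pvR0, ← List.countP_eq_length_filter]
theorem pvLen2 (ps : List String) : (pvM2 ps).length = (pvL ps).countP (fun p => pvHit pvKw2 p && (!pvHit pvKw1 p && !pvHit pvKw0 p)) := by
  simp [pvM2, pvR1, pvR0, ← List.countP_eq_length_filter]
theorem pvLen3 (ps : List String) : (pvM3 ps).length = (pvL ps).countP (fun p => pvHit pvKw3 p && (!pvHit pvKw2 p && (!pvHit pvKw1 p && !pvHit pvKw0 p))) := by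
  simp [pvM3, pvR2, pvR1, pvR0, ← List.countP_eq_length_filter]
theorem pvLen4 (ps : List String) : (pvM4 ps).length = (pvL ps).countP (fun p => pvHit pvKw4 p && (!pvHit pvKw3 p && (!pvHit pvKw2 p && (!pvHit pvKw1 p && !pvHit pvKw0 p)))) := by
  simp [pvM4, pvR3, pvR2, pvR1, pvR0, ← List.countP_eq_length_filter]

-- assembling the nonzero categories: A's filter-then-rebuild = B's conditional-insert chain
theorem pvAssemble (n0 n1 n2 n3 n4 : Nat) :
    ((([("direct_extraction", (n0 : Int)), ("manipulation", (n1 : Int)), ("probing", (n2 : Int)),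
        ("encoding", (n3 : Int)), ("structural", (n4 : Int))].filter (fun kv => decide (0 < kv.2))).foldl
        (fun d kv => d.insert kv.1 kv.2) PySem.Dict.empty).items : List (String × Int))
    = ((if n4 = 0 then
          (if n3 = 0 then
            (if n2 = 0 then
              (if n1 = 0 then
                (if n0 = 0 then PySem.Dict.empty else PySem.Dict.empty.insert "direct_extraction" (n0 : Int))
               else (if n0 = 0 then PySem.Dict.empty else PySem.Dict.empty.insert "direct_extraction" (n0 : Int)).insert "manipulation" (n1 : Int))
             else (if n1 = 0 then
                (if n0 = 0 then PySem.Dict.empty else PySem.Dict.empty.insert "direct_extraction" (n0 : Int))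
               else (if n0 = 0 then PySem.Dict.empty else PySem.Dict.empty.insert "direct_extraction" (n0 : Int)).insert "manipulation" (n1 : Int)).insert "probing" (n2 : Int))
           else ((if n2 = 0 then
              (if n1 = 0 then
                (if n0 = 0 then PySem.Dict.empty else PySem.Dict.empty.insert "direct_extraction" (n0 : Int))
               else (if n0 = 0 then PySem.Dict.empty else PySem.Dict.empty.insert "direct_extraction" (n0 : Int)).insert "manipulation" (n1 : Int))
             else (if n1 = 0 then
                (if n0 = 0 then PySem.Dict.empty else PySem.Dict.empty.insert "direct_extraction" (n0 : Int))
               else (if n0 = 0 then PySem.Dict.empty else PySem.Dict.empty.insert "direct_extraction" (n0 : Int)).insert "manipulation" (n1 : Int)).insert "probing" (n2 : Int))).insert "encoding" (n3 : Int))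
        else
          (if n3 = 0 then
            (if n2 = 0 then
              (if n1 = 0 then
                (if n0 = 0 then PySem.Dict.empty else PySem.Dict.empty.insert "direct_extraction" (n0 : Int))
               else (if n0 = 0 then PySem.Dict.empty else PySem.Dict.empty.insert "direct_extraction" (n0 : Int)).insert "manipulation" (n1 : Int))
             else (if n1 = 0 then
                (if n0 = 0 then PySem.Dict.empty else PySem.Dict.empty.insert "direct_extraction" (n0 : Int))
               else (if n0 = 0 then PySem.Dict.empty else PySem.Dict.empty.insert "direct_extraction" (n0 : Int)).insert "manipulation" (n1 : Int)).insert "probing" (n2 : Int))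
           else ((if n2 = 0 then
              (if n1 = 0 then
                (if n0 = 0 then PySem.Dict.empty else PySem.Dict.empty.insert "direct_extraction" (n0 : Int))
               else (if n0 = 0 then PySem.Dict.empty else PySem.Dict.empty.insert "direct_extraction" (n0 : Int)).insert "manipulation" (n1 : Int))
             else (if n1 = 0 then
                (if n0 = 0 then PySem.Dict.empty else PySem.Dict.empty.insert "direct_extraction" (n0 : Int))
               else (if n0 = 0 then PySem.Dict.empty else PySem.Dict.empty.insert "direct_extraction" (n0 : Int)).insert "manipulation" (n1 : Int)).insert "probing" (n2 : Int))).insert "encoding" (n3 : Int)).insert "structural" (n4 : Int)).items : List (String × Int)) := by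
  by_cases h0 : n0 = 0 <;> by_cases h1 : n1 = 0 <;> by_cases h2 : n2 = 0 <;>
    by_cases h3 : n3 = 0 <;> by_cases h4 : n4 = 0 <;>
    simp [h0, h1, h2, h3, h4, Nat.pos_of_ne_zero, PySem.Dict.insert,
      PySem.Dict.empty, PySem.Dict.contains]

-- ===== VERDICT (by name: the statement is the Claim_ definition above) =====
theorem categorize_techniques_py_spec : Claim_equal_categorize_techniques_py := by
  unfold Claim_equal_categorize_techniques_py
  intro ps _
  unfold Spec_categorize_techniques_py categorize_techniques_py
  rw [show (PySem.Dict.ofList [("direct_extraction", (0 : Int)), ("manipulation", 0),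
        ("probing", 0), ("encoding", 0), ("structural", 0)])
      = PySem.Dict.mk [("direct_extraction", (0 : Int)), ("manipulation", 0), ("probing", 0),
        ("encoding", 0), ("structural", 0)] from rfl]
  rw [pvA_fold, pvB_eq]
  have e0 : (pvM0 ps = []) ↔ ((pvM0 ps).length = 0) := List.length_eq_zero_iff.symm
  have e1 : (pvM1 ps = []) ↔ ((pvM1 ps).length = 0) := List.length_eq_zero_iff.symm
  have e2 : (pvM2 ps = []) ↔ ((pvM2 ps).length = 0) := List.length_eq_zero_iff.symm
  have e3 : (pvM3 ps = []) ↔ ((pvM3 ps).length = 0) := List.length_eq_zero_iff.symm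
  have e4 : (pvM4 ps = []) ↔ ((pvM4 ps).length = 0) := List.length_eq_zero_iff.symm
  simp only [e0, e1, e2, e3, e4, pvLen0, pvLen1, pvLen2, pvLen3, pvLen4, zero_add]
  exact pvAssemble _ _ _ _ _
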